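-- pv_equiv track=rewrite | github.com/polawitkowska/Kryptografia | lab06/stegano.py | extract_method2
-- ===== SOURCE A (Python) =====
-- def extract_method2(html_content):
--   bits = ''
--   i = 0
--
--   while i < len(html_content):
--     if html_content[i] == ' ':
--       if i + 1 < len(html_content) and html_content[i + 1] == ' ':
--         bits += '1'
--         i += 2
--       else:
--         prev_char = html_content[i-1] if i > 0 else ''
--         if prev_char != '\n' and prev_char != '\t':
--           bits += '0'
--         i += 1
--     else:
--       i += 1
--
--   return bits
-- ===== SOURCE B (Python) =====
-- def extract_method2(html_content):
--     pieces = []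
--     n = len(html_content)
--     i = 0
--     while i < n:
--         if html_content[i] != ' ':
--             i += 1
--             continue
--         j = i
--         while j < n and html_content[j] == ' ':
--             j += 1
--         L = j - i
--         pieces.append('1' * (L // 2))
--         if L % 2 == 1:
--             prev = html_content[i - 1] if i > 0 else ''
--             if L > 1 or (prev != '\n' and prev != '\t'):
--                 pieces.append('0')
--         i = j
--     return ''.join(pieces)
-- ===== Notes on version B (the rewrite author's own statement) =====
-- stated objective: alternative
-- what changed: B replaces A's per-character index walk by a run-based scan: it locates each maximal run of spaces once, derives that run's whole bit contribution from its length and the character preceding the run, and jumps past the run.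
import Mathlib
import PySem

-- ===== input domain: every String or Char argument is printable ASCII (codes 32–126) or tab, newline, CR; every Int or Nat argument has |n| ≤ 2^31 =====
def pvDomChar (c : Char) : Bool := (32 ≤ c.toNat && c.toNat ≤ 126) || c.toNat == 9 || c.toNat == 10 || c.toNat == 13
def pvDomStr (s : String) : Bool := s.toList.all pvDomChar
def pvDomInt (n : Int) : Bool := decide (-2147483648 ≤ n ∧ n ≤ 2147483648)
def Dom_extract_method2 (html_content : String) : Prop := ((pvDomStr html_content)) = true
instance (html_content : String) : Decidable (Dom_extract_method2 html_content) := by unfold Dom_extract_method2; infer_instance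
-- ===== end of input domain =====

-- B is an alternative decomposition: it scans maximal runs of spaces instead of A's
-- per-character index walk; return values are proved equal on all inputs.

-- ===== PORT A =====
-- A walks an index; we transliterate by recursing on the remaining characters,
-- carrying the previous character (none = start of string, Python's '').
def extractA (prev : Option Char) : List Char → List Char
  | [] => []
  | [c] =>
    if c = ' ' then
      -- single trailing space: prev-char test, then the loop ends
      if prev ≠ some '\n' ∧ prev ≠ some '\t' then ['0'] else []
    else []
  | c :: c2 :: rest2 =>
    if c = ' ' then
      if c2 = ' ' then
        '1' :: extractA (some ' ') rest2
      else
        (if prev ≠ some '\n' ∧ prev ≠ some '\t' then ['0'] else []) ++ extractA (some ' ') (c2 :: rest2)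
    else extractA (some c) (c2 :: rest2)

def extract_method2 (html_content : String) : String :=
  String.mk (extractA none html_content.toList)

-- ===== PORT B =====
-- Source B's condition `L > 1 or (prev != '\n' and prev != '\t')`
def prevOkB (prev : Option Char) : Bool := !(prev == some '\n') && !(prev == some '\t')

def extractB (prev : Option Char) : List Char → List Char
  | [] => []
  | c :: rest =>
    if h : c ≠ ' ' then extractB (some c) rest
    else
      let run := List.takeWhile (fun x => x == ' ') (c :: rest)
      let rest' := List.dropWhile (fun x => x == ' ') (c :: rest)
      let L := run.length
      List.replicate (L / 2) '1' ++
        (if L % 2 = 1 && (decide (L > 1) || prevOkB prev) then ['0'] else []) ++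
        extractB (some ' ') rest'
  termination_by l => l.length
  decreasing_by
    · simp
    · simp at h
      simp [List.dropWhile, h]
      exact List.length_dropWhile_le _ _

def extract_method2_alt (html_content : String) : String :=
  String.mk (extractB none html_content.toList)

-- ===== PRECONDITION & SPEC =====
def Spec_extract_method2 (html_content : String) (out : String) : Prop := out = extract_method2_alt html_content
instance (html_content : String) (out : String) : Decidable (Spec_extract_method2 html_content out) := by unfold Spec_extract_method2; infer_instance

-- ===== CLAIM (what is proved, stated in full; the proofs are below) =====
def Claim_equal_extract_method2 : Prop := ∀ (html_content : String), Dom_extract_method2 html_content → Spec_extract_method2 html_content (extract_method2 html_content)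

-- ===== LEMMAS AND PROOFS =====

-- A's Prop-valued previous-char test coincides with B's Bool one.
lemma prevOk_eq (prev : Option Char) (X Y : List Char) :
    (if prev ≠ some '\n' ∧ prev ≠ some '\t' then X else Y)
      = (if prevOkB prev then X else Y) := by
  rcases prev with _ | c <;> simp [prevOkB]

-- What A produces across one maximal run of L spaces.
lemma runA : ∀ L, 1 ≤ L → ∀ (prev : Option Char) (rest' : List Char),
    rest'.head? ≠ some ' ' →
    extractA prev (List.replicate L ' ' ++ rest')
      = List.replicate (L / 2) '1' ++
        (if L % 2 = 1 && (decide (L > 1) || prevOkB prev) then ['0'] else []) ++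
        extractA (some ' ') rest' := by
  intro L
  induction L using Nat.strong_induction_on with
  | _ L IH =>
    intro hL prev rest' hhead
    match L, hL with
    | 1, _ =>
      cases rest' with
      | nil => simp [extractA, prevOk_eq]
      | cons c2 r2 =>
        have hc2 : c2 ≠ ' ' := by simpa using hhead
        simp [extractA, hc2, prevOk_eq]
    | 2, _ =>
      simp [extractA]
    | (L' + 3), _ =>
      have hrec := IH (L' + 1) (by omega) (by omega) (some ' ') rest' hhead
      have hrep : List.replicate (L' + 3) ' ' = ' ' :: ' ' :: List.replicate (L' + 1) ' ' := by
        simp [List.replicate_succ]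
      rw [hrep]
      simp only [List.cons_append, extractA]
      rw [hrec]
      have h2 : (L' + 3) / 2 = (L' + 1) / 2 + 1 := by omega
      have h3 : (L' + 3) % 2 = (L' + 1) % 2 := by omega
      simp [h2, h3, List.replicate_succ, prevOkB]

-- Main equivalence of the two scanners, by strong induction on the length.
lemma extract_eq : ∀ n (l : List Char) (prev : Option Char), l.length ≤ n →
    extractA prev l = extractB prev l := by
  intro n
  induction n with
  | zero =>
    intro l prev h
    have : l = [] := by
      cases l with
      | nil => rfl
      | cons a t => simp at h
    simp [this, extractA, extractB]
  | succ n IH =>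
    intro l prev h
    cases l with
    | nil => simp [extractA, extractB]
    | cons c rest =>
      by_cases hc : c = ' '
      · -- decompose into the maximal run and the remainder
        subst hc
        set run := List.takeWhile (fun x => x == ' ') (' ' :: rest) with hrun
        set rest' := List.dropWhile (fun x => x == ' ') (' ' :: rest) with hrest'
        have hsplit : run ++ rest' = ' ' :: rest := List.takeWhile_append_dropWhile
        have hrunrep : run = List.replicate run.length ' ' := by
          apply List.eq_replicate_of_mem
          intro b hb
          have := List.mem_takeWhile_imp hb
          simpa using this
        have hL1 : 1 ≤ run.length := by
          rw [hrun]
          simp [List.takeWhile]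
        have hhead : rest'.head? ≠ some ' ' := by
          intro hcon
          cases hre : rest' with
          | nil => simp [hre] at hcon
          | cons d t =>
            have hd : d = ' ' := by simp [hre] at hcon; exact hcon
            have := List.head?_dropWhile_not (fun x => x == ' ') (' ' :: rest)
            rw [← hrest', hre] at this
            simp [hd] at this
        have hA : extractA prev (' ' :: rest)
            = List.replicate (run.length / 2) '1' ++
              (if run.length % 2 = 1 && (decide (run.length > 1) || prevOkB prev) then ['0'] else []) ++
              extractA (some ' ') rest' := by
          conv_lhs => rw [← hsplit, hrunrep]
          exact runA run.length hL1 prev rest' hhead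
        have hlen : rest'.length ≤ n := by
          have h2 := congrArg List.length hsplit
          simp at h2 h
          omega
        have hrunL : run.length = (List.takeWhile (fun x => x == ' ') rest).length + 1 := by
          simp [hrun, List.takeWhile]
        have hrest2 : rest' = List.dropWhile (fun x => x == ' ') rest := by
          simp [hrest', List.dropWhile]
        rw [hA, IH rest' (some ' ') hlen]
        rw [extractB]
        simp only [hrunL, hrest2]
        simp
      · have hA : extractA prev (c :: rest) = extractA (some c) rest := by
          cases rest with
          | nil => simp [extractA, hc]
          | cons d t => simp [extractA, hc]
        have hB : extractB prev (c :: rest) = extractB (some c) rest := by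
          rw [extractB]; simp [hc]
        rw [hA, hB]
        exact IH rest (some c) (by simp at h; omega)

-- ===== VERDICT (by name: the statement is the Claim_ definition above) =====
theorem extract_method2_spec : Claim_equal_extract_method2 := by
  intro s _
  unfold Spec_extract_method2 extract_method2 extract_method2_alt
  rw [extract_eq s.toList.length s.toList none le_rfl]
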